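-- pv_equiv track=rewrite | github.com/DiCarloLab-Delft/PycQED_py3 | pycqed/analysis/tools/data_manipulation.py | count_error_fractions
-- ===== SOURCE A (Python) =====
-- def count_error_fractions(trace):
--     """
--     The counters produce the same results as the CBox counters in
--     CBox.get_qubit_state_log_counters().
--     Requires a boolean array or an array of ints as input.
--     """
--     no_err_counter = 0
--     single_err_counter = 0
--     double_err_counter = 0
--     zero_counter = 0
--     one_counter = 0
--
--     for i in range(len(trace)):
--         if i < (len(trace) - 1):
--             if trace[i] == trace[i + 1]:
--                 # A single error is associated with a qubit error
--                 single_err_counter += 1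
--                 if i < (len(trace) - 2):
--                     if trace[i] == trace[i + 2]:
--                         # If there are two errors in a row this is associated with
--                         # a RO error, this counter must be substracted from the
--                         # single counter
--                         double_err_counter += 1
--             else:
--                 no_err_counter += 1
--         if trace[i] == 1:
--             zero_counter += 1
--         else:
--             one_counter += 1
--
--     return (
--         no_err_counter,
--         single_err_counter,
--         double_err_counter,
--         zero_counter,
--         one_counter,
--     )
-- ===== SOURCE B (Python) =====
-- def _runs(trace):
--     """Run-length encode: list of (value, length) of maximal blocks of equal
--     consecutive values, scanned with two pointers."""
--     runs = []
--     i = 0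
--     n = len(trace)
--     while i < n:
--         j = i + 1
--         while j < n and trace[j] == trace[i]:
--             j += 1
--         runs.append((trace[i], j - i))
--         i = j
--     return runs
--
--
-- def count_error_fractions(trace):
--     runs = _runs(trace)
--     n = sum(L for _, L in runs)
--     k = len(runs)
--     single_err = n - k
--     no_err = k - 1 if k > 0 else 0
--     double_err = sum(L - 2 for _, L in runs if L > 2)
--     zero = sum(L for v, L in runs if v == 1)
--     one = n - zero
--     return (no_err, single_err, double_err, zero, one)
-- ===== Notes on version B (the rewrite author's own statement) =====
-- stated objective: alternative
-- what changed: B first run-length-encodes the trace into (value, length) blocks with a two-pointer scan, then derives all five counters arithmetically from the run lengths (single = n - #runs, no_err = #runs - 1, double = sum of max(L-2,0)), instead of A's single index loop with nested positional comparisons.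
import Mathlib
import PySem

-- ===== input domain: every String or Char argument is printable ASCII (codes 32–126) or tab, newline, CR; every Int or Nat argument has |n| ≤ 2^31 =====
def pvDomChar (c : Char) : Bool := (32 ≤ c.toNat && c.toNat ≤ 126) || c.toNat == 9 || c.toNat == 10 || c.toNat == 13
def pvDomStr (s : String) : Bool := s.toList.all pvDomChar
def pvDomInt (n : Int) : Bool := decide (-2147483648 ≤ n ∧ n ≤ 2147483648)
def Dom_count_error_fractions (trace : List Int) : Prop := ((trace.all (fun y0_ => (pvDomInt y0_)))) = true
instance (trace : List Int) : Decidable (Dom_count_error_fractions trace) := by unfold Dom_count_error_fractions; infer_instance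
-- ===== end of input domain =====

-- B run-length-encodes the trace into (value, length) blocks and derives all five
-- counters arithmetically from the run lengths (objective: alternative algorithm).

-- ===== PORT A =====
-- loop body of A; indices i, i+1, i+2 are only read when in range, so getD _ 0 is exact for trace[_]
def stepA (t : List Int) (st : Int × Int × Int × Int × Int) (i : Nat) : Int × Int × Int × Int × Int :=
  match st with
  | (ne, se, de, z, o) =>
    let (ne, se, de) :=
      if i < t.length - 1 then
        if t.getD i 0 = t.getD (i+1) 0 then
          let se := se + 1
          let de := if i < t.length - 2 then
                      if t.getD i 0 = t.getD (i+2) 0 then de + 1 else de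
                    else de
          (ne, se, de)
        else (ne + 1, se, de)
      else (ne, se, de)
    if t.getD i 0 = 1 then (ne, se, de, z + 1, o)
    else (ne, se, de, z, o + 1)

def count_error_fractions (trace : List Int) : Int × Int × Int × Int × Int :=
  (List.range trace.length).foldl (stepA trace) (0, 0, 0, 0, 0)

-- ===== PORT B =====
-- Source B's _runs: the inner while loop scans the equal prefix of the tail (= takeWhile,
-- exact), the outer loop continues after the run (= drop that many elements)
def pyRuns (t : List Int) : List (Int × Int) :=
  match t with
  | [] => []
  | x :: rest =>
    (x, (1 : Int) + (rest.takeWhile (fun y => y == x)).length)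
      :: pyRuns (rest.drop (rest.takeWhile (fun y => y == x)).length)
termination_by t.length
decreasing_by simp

def count_error_fractions_alt (trace : List Int) : Int × Int × Int × Int × Int :=
  let runs := pyRuns trace
  let n : Int := (runs.map (fun p => p.2)).sum
  let k : Int := runs.length
  let single_err := n - k
  let no_err := if k > 0 then k - 1 else 0
  let double_err := ((runs.filter (fun p => decide (p.2 > 2))).map (fun p => p.2 - 2)).sum
  let zero := ((runs.filter (fun p => p.1 == 1)).map (fun p => p.2)).sum
  let one := n - zero
  (no_err, single_err, double_err, zero, one)

-- ===== PRECONDITION & SPEC =====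
def Spec_count_error_fractions (trace : List Int) (out : Int × Int × Int × Int × Int) : Prop := out = count_error_fractions_alt trace
instance (trace : List Int) (out : Int × Int × Int × Int × Int) : Decidable (Spec_count_error_fractions trace out) := by unfold Spec_count_error_fractions; infer_instance

-- ===== CLAIM (what is proved, stated in full; the proofs are below) =====
def Claim_equal_count_error_fractions : Prop := ∀ (trace : List Int), Dom_count_error_fractions trace → Spec_count_error_fractions trace (count_error_fractions trace)

-- ===== LEMMAS AND PROOFS =====

-- predicates describing A's counters, over indices
def pPair (t : List Int) (i : Nat) : Bool := t.getD i 0 == t.getD (i+1) 0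
def pTrip (t : List Int) (i : Nat) : Bool := (t.getD i 0 == t.getD (i+1) 0) && (t.getD i 0 == t.getD (i+2) 0)

-- recursive characterisations of adjacent-pair / adjacent-triple counts and ones
def eqPairs : List Int → Nat
  | a :: b :: r => (if a = b then 1 else 0) + eqPairs (b :: r)
  | _ => 0

def triEq : List Int → Nat
  | a :: b :: c :: r => (if a = b ∧ a = c then 1 else 0) + triEq (b :: c :: r)
  | _ => 0

lemma stepA_eq (t : List Int) (st : Int × Int × Int × Int × Int) (m : Nat) :
    stepA t st m =
      ( st.1 + (if m < t.length - 1 then (if t.getD m 0 = t.getD (m+1) 0 then 0 else 1) else 0),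
        st.2.1 + (if m < t.length - 1 then (if t.getD m 0 = t.getD (m+1) 0 then 1 else 0) else 0),
        st.2.2.1 + (if m < t.length - 1 then
            (if t.getD m 0 = t.getD (m+1) 0 then
              (if m < t.length - 2 then (if t.getD m 0 = t.getD (m+2) 0 then 1 else 0) else 0)
            else 0) else 0),
        st.2.2.2.1 + (if t.getD m 0 = 1 then 1 else 0),
        st.2.2.2.2 + (if t.getD m 0 = 1 then 0 else 1) ) := by
  obtain ⟨a, b, c, d, e⟩ := st
  simp only [stepA]
  split_ifs <;> simp

lemma g1_eq (t : List Int) (m : Nat) :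
    (((if (decide (m < t.length - 1) && !(pPair t m)) = true then 1 else 0 : Nat)) : Int)
      = if m < t.length - 1 then (if t.getD m 0 = t.getD (m+1) 0 then 0 else 1) else 0 := by
  by_cases h1 : m < t.length - 1 <;> by_cases e1 : t.getD m 0 = t.getD (m+1) 0 <;>
    simp [pPair, List.getD, h1]

lemma g2_eq (t : List Int) (m : Nat) :
    (((if (decide (m < t.length - 1) && pPair t m) = true then 1 else 0 : Nat)) : Int)
      = if m < t.length - 1 then (if t.getD m 0 = t.getD (m+1) 0 then 1 else 0) else 0 := by
  by_cases h1 : m < t.length - 1 <;> by_cases e1 : t.getD m 0 = t.getD (m+1) 0 <;>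
    simp [pPair, List.getD, h1]

lemma g3_eq (t : List Int) (m : Nat) :
    (((if (decide (m < t.length - 2) && pTrip t m) = true then 1 else 0 : Nat)) : Int)
      = if m < t.length - 1 then
          (if t.getD m 0 = t.getD (m+1) 0 then
            (if m < t.length - 2 then (if t.getD m 0 = t.getD (m+2) 0 then 1 else 0) else 0)
          else 0) else 0 := by
  by_cases h1 : m < t.length - 1 <;> by_cases h2 : m < t.length - 2 <;>
    by_cases e1 : t.getD m 0 = t.getD (m+1) 0 <;> by_cases e2 : t.getD m 0 = t.getD (m+2) 0 <;>
    simp [pTrip, List.getD, h1, h2] <;> omega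

lemma g4_eq (t : List Int) (m : Nat) :
    (((if (t.getD m 0 == 1) = true then 1 else 0 : Nat)) : Int)
      = if t.getD m 0 = 1 then 1 else 0 := by
  by_cases e3 : t.getD m 0 = 1 <;> simp [List.getD]

lemma g5_eq (t : List Int) (m : Nat) :
    (((if (!(t.getD m 0 == 1)) = true then 1 else 0 : Nat)) : Int)
      = if t.getD m 0 = 1 then 0 else 1 := by
  by_cases e3 : t.getD m 0 = 1 <;> simp [List.getD]

lemma foldA_eq (t : List Int) (m : Nat) :
    (List.range m).foldl (stepA t) (0, 0, 0, 0, 0) =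
      ( ((List.range m).countP (fun i => decide (i < t.length - 1) && !(pPair t i)) : Int),
        ((List.range m).countP (fun i => decide (i < t.length - 1) && pPair t i) : Int),
        ((List.range m).countP (fun i => decide (i < t.length - 2) && pTrip t i) : Int),
        ((List.range m).countP (fun i => t.getD i 0 == 1) : Int),
        ((List.range m).countP (fun i => !(t.getD i 0 == 1)) : Int) ) := by
  induction m with
  | zero => simp
  | succ m ih =>
    rw [List.range_succ, List.foldl_append, List.foldl_cons, List.foldl_nil, ih, stepA_eq]
    simp only [List.countP_append, List.countP_cons, List.countP_nil, Nat.zero_add,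
      Prod.mk.injEq]
    refine ⟨?_, ?_, ?_, ?_, ?_⟩
    · push_cast [← g1_eq]; ring
    · push_cast [← g2_eq]; ring
    · push_cast [← g3_eq]; ring
    · push_cast [← g4_eq]; ring
    · push_cast [← g5_eq]; ring

lemma countP_range_guard (p : Nat → Bool) (k n : Nat) (h : k ≤ n) :
    (List.range n).countP (fun i => decide (i < k) && p i) = (List.range k).countP p := by
  induction n with
  | zero =>
    have hk0 : k = 0 := Nat.le_zero.mp h
    simp [hk0]
  | succ n ih =>
    rcases Nat.lt_or_ge k (n+1) with hk | hk
    · have hk' : k ≤ n := Nat.lt_succ_iff.mp hk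
      rw [List.range_succ, List.countP_append, ih hk']
      simp [Nat.not_lt.mpr hk']
    · have hkn : k = n + 1 := Nat.le_antisymm h hk
      subst hkn
      apply List.countP_congr
      intro i hi
      simp [List.mem_range.mp hi]

lemma map_range_getD (t : List Int) :
    (List.range t.length).map (fun i => t.getD i 0) = t := by
  apply List.ext_getElem
  · simp
  · intro i h1 h2
    rw [List.getElem_map, List.getElem_range, List.getD_eq_getElem _ _ h2]

lemma zip_tail_eq (t : List Int) :
    t.zip (t.drop 1) = (List.range (t.length - 1)).map (fun i => (t.getD i 0, t.getD (i+1) 0)) := by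
  apply List.ext_getElem
  · simp
  · intro i h1 h2
    simp at h1 h2
    rw [List.getElem_zip, List.getElem_map, List.getElem_range, List.getElem_drop,
        List.getD_eq_getElem _ _ (by omega), List.getD_eq_getElem _ _ (by omega)]
    simp [show 1 + i = i + 1 from by omega]

lemma zip_tail2_eq (t : List Int) :
    (t.zip (t.drop 1)).zip (t.drop 2) =
      (List.range (t.length - 2)).map (fun i => ((t.getD i 0, t.getD (i+1) 0), t.getD (i+2) 0)) := by
  apply List.ext_getElem
  · simp; omega
  · intro i h1 h2
    simp at h1 h2
    rw [List.getElem_zip, List.getElem_zip, List.getElem_map, List.getElem_range,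
        List.getElem_drop, List.getElem_drop,
        List.getD_eq_getElem _ _ (by omega), List.getD_eq_getElem _ _ (by omega),
        List.getD_eq_getElem _ _ (by omega)]
    simp [show 1 + i = i + 1 from by omega, show 2 + i = i + 2 from by omega]

lemma countP_not_add {α : Type} (l : List α) (p : α → Bool) :
    l.countP (fun x => !(p x)) = l.length - l.countP p := by
  induction l with
  | nil => simp
  | cons a l ih =>
    have hle := List.countP_le_length (p := p) (l := l)
    by_cases h : p a <;> simp [h, ih] <;> omega

-- bridge: range-countP of pPair/pTrip = countP over zipped tails
lemma range_pPair_eq (t : List Int) :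
    (List.range (t.length - 1)).countP (pPair t)
      = (t.zip (t.drop 1)).countP (fun p => p.1 == p.2) := by
  rw [zip_tail_eq, List.countP_map]; rfl

lemma range_pTrip_eq (t : List Int) :
    (List.range (t.length - 2)).countP (pTrip t)
      = ((t.zip (t.drop 1)).zip (t.drop 2)).countP (fun p => p.1.1 == p.1.2 && p.1.1 == p.2) := by
  rw [zip_tail2_eq, List.countP_map]; rfl

-- zipped-tail counts = recursive counts
lemma zip_eqPairs (t : List Int) :
    (t.zip (t.drop 1)).countP (fun p => p.1 == p.2) = eqPairs t := by
  induction t with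
  | nil => simp [eqPairs]
  | cons a r ih =>
    cases r with
    | nil => simp [eqPairs]
    | cons b s =>
      rw [show ((a :: b :: s).zip ((a :: b :: s).drop 1))
            = (a, b) :: ((b :: s).zip ((b :: s).drop 1)) from by simp [List.zip],
          List.countP_cons, ih]
      by_cases h : a = b <;> simp [eqPairs, h, Nat.add_comm]

lemma zip_triEq (t : List Int) :
    ((t.zip (t.drop 1)).zip (t.drop 2)).countP (fun p => p.1.1 == p.1.2 && p.1.1 == p.2)
      = triEq t := by
  induction t with
  | nil => simp [triEq]
  | cons a r ih =>
    cases r with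
    | nil => simp [triEq]
    | cons b s =>
      cases s with
      | nil => simp [triEq, List.zip]
      | cons c u =>
        rw [show (((a :: b :: c :: u).zip ((a :: b :: c :: u).drop 1)).zip ((a :: b :: c :: u).drop 2))
              = ((a, b), c) :: (((b :: c :: u).zip ((b :: c :: u).drop 1)).zip ((b :: c :: u).drop 2)) from by
            simp [List.zip],
          List.countP_cons, ih]
        by_cases h1 : a = b <;> by_cases h2 : a = c <;>
          simp [triEq, h1, h2, Nat.add_comm]

-- structure of a run: all-equal prefix followed by remainder not starting with x
lemma drop_length_takeWhile {α : Type} (p : α → Bool) (l : List α) :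
    l.drop (l.takeWhile p).length = l.dropWhile p := by
  induction l with
  | nil => simp
  | cons a l ih =>
    by_cases h : p a <;> simp [List.takeWhile, List.dropWhile, h, ih]

lemma takeWhile_all {α : Type} (p : α → Bool) (l : List α) :
    ∀ y ∈ l.takeWhile p, p y = true := by
  induction l with
  | nil => simp
  | cons a l ih =>
    intro y hy
    by_cases h : p a
    · rw [List.takeWhile_cons, if_pos h] at hy
      rcases List.mem_cons.mp hy with rfl | hy'
      · exact h
      · exact ih y hy'
    · rw [List.takeWhile_cons, if_neg h] at hy
      cases hy

lemma dropWhile_head_not {α : Type} (p : α → Bool) (l : List α) :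
    l.dropWhile p = [] ∨ ∃ c s, l.dropWhile p = c :: s ∧ p c = false := by
  induction l with
  | nil => simp
  | cons a l ih =>
    by_cases h : p a
    · simpa [List.dropWhile, h] using ih
    · right; exact ⟨a, l, by simp [List.dropWhile, h], by simp [h]⟩

-- run-step lemmas: g is all x, r does not start with x
lemma eqPairs_run (x : Int) (g r : List Int)
    (hg : ∀ y ∈ g, y = x) (hr : r = [] ∨ ∃ c s, r = c :: s ∧ c ≠ x) :
    eqPairs (x :: g ++ r) = g.length + eqPairs r := by
  induction g generalizing x with
  | nil =>
    rcases hr with h | ⟨c, s, rfl, hc⟩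
    · simp [h, eqPairs]
    · have hxc : x ≠ c := fun h => hc h.symm
      simp [eqPairs, hxc]
  | cons y g' ih =>
    have hy : y = x := hg y (by simp)
    have hg' : ∀ z ∈ g', z = x := fun z hz => hg z (by simp [hz])
    subst hy
    have hrec := ih y hg' hr
    have hstep : eqPairs (y :: y :: (g' ++ r))
        = (if y = y then 1 else 0) + eqPairs (y :: (g' ++ r)) := rfl
    simp only [List.cons_append] at hrec ⊢
    rw [hstep, hrec]
    simp
    try omega

lemma triEq_run (x : Int) (g r : List Int)
    (hg : ∀ y ∈ g, y = x) (hr : r = [] ∨ ∃ c s, r = c :: s ∧ c ≠ x) :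
    triEq (x :: g ++ r) = (g.length - 1) + triEq r := by
  induction g generalizing x with
  | nil =>
    rcases hr with h | ⟨c, s, rfl, hc⟩
    · simp [h, triEq]
    · cases s with
      | nil => simp [triEq]
      | cons d u =>
        have hxc : x ≠ c := fun h => hc h.symm
        simp [triEq, hxc]
  | cons y g' ih =>
    have hy : y = x := hg y (by simp)
    have hg' : ∀ z ∈ g', z = x := fun z hz => hg z (by simp [hz])
    subst hy
    have hrec := ih y hg' hr
    cases g' with
    | nil =>
      rcases hr with h | ⟨c, s, rfl, hc⟩
      · simp [h, triEq]
      · simp only [List.nil_append, List.cons_append] at hrec ⊢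
        have : triEq (y :: y :: c :: s) = (if y = y ∧ y = c then 1 else 0) + triEq (y :: c :: s) := rfl
        rw [this, hrec]
        have hyc : y ≠ c := fun h => hc h.symm
        simp [hyc]
    | cons z g'' =>
      have hz : z = y := hg' z (by simp)
      subst hz
      simp only [List.cons_append] at hrec ⊢
      have : triEq (z :: z :: z :: (g'' ++ r))
          = (if z = z ∧ z = z then 1 else 0) + triEq (z :: z :: (g'' ++ r)) := rfl
      rw [this, hrec]
      simp
      omega

lemma count1_run (x : Int) (g r : List Int) (hg : ∀ y ∈ g, y = x) :
    (x :: g ++ r).countP (fun y => y == 1)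
      = (if x = 1 then g.length + 1 else 0) + r.countP (fun y => y == 1) := by
  induction g generalizing x with
  | nil => by_cases h : x = 1 <;> simp [List.countP_cons, h] <;> omega
  | cons y g' ih =>
    have hy : y = x := hg y (by simp)
    have hg' : ∀ z ∈ g', z = x := fun z hz => hg z (by simp [hz])
    subst hy
    have := ih y hg'
    simp only [List.cons_append, List.countP_cons] at *
    by_cases h : y = 1 <;> simp [h] at * <;> omega

-- the four pyRuns characterisations, by the recursion of pyRuns
lemma pyRuns_split (x : Int) (rest : List Int) :
    rest = rest.takeWhile (fun y => y == x) ++ rest.drop (rest.takeWhile (fun y => y == x)).length := by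
  rw [drop_length_takeWhile, List.takeWhile_append_dropWhile]

lemma pyRuns_rem_shape (x : Int) (rest : List Int) :
    rest.drop (rest.takeWhile (fun y => y == x)).length = [] ∨
      ∃ c s, rest.drop (rest.takeWhile (fun y => y == x)).length = c :: s ∧ c ≠ x := by
  rw [drop_length_takeWhile]
  rcases dropWhile_head_not (fun y => y == x) rest with h | ⟨c, s, h1, h2⟩
  · exact Or.inl h
  · exact Or.inr ⟨c, s, h1, by simpa using h2⟩

lemma pyRuns_takeWhile_all (x : Int) (rest : List Int) :
    ∀ y ∈ rest.takeWhile (fun y => y == x), y = x := by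
  intro y hy
  have := takeWhile_all (fun y => y == x) rest y hy
  simpa using this

lemma pyRuns_sum (t : List Int) :
    ((pyRuns t).map (fun p => p.2)).sum = (t.length : Int) := by
  induction t using pyRuns.induct with
  | case1 => simp [pyRuns]
  | case2 x rest ih =>
    rw [pyRuns]
    simp only [List.map_cons, List.sum_cons, ih]
    have hle : (rest.takeWhile (fun y => y == x)).length ≤ rest.length :=
      (List.takeWhile_sublist _).length_le
    have hd : (rest.drop (rest.takeWhile (fun y => y == x)).length).length
        = rest.length - (rest.takeWhile (fun y => y == x)).length := List.length_drop ..
    rw [hd]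
    simp only [List.length_cons]
    push_cast [Nat.cast_sub hle]
    ring

lemma pyRuns_eqPairs (t : List Int) :
    eqPairs t + (pyRuns t).length = t.length := by
  induction t using pyRuns.induct with
  | case1 => simp [pyRuns, eqPairs]
  | case2 x rest ih =>
    have hstep : eqPairs (x :: rest)
        = (rest.takeWhile (fun y => y == x)).length
            + eqPairs (rest.drop (rest.takeWhile (fun y => y == x)).length) := by
      conv_lhs => rw [show (x :: rest)
          = x :: (rest.takeWhile (fun y => y == x))
              ++ rest.drop (rest.takeWhile (fun y => y == x)).length from
        congrArg (fun l => x :: l) (pyRuns_split x rest)]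
      exact eqPairs_run x _ _ (pyRuns_takeWhile_all x rest) (pyRuns_rem_shape x rest)
    have hle : (rest.takeWhile (fun y => y == x)).length ≤ rest.length :=
      (List.takeWhile_sublist _).length_le
    have hd : (rest.drop (rest.takeWhile (fun y => y == x)).length).length
        = rest.length - (rest.takeWhile (fun y => y == x)).length := List.length_drop ..
    rw [pyRuns]
    simp only [List.length_cons, hstep]
    omega

lemma pyRuns_triEq (t : List Int) :
    (((pyRuns t).filter (fun p => decide (p.2 > 2))).map (fun p => p.2 - 2)).sum
      = (triEq t : Int) := by
  induction t using pyRuns.induct with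
  | case1 => simp [pyRuns, triEq]
  | case2 x rest ih =>
    have hstep : triEq (x :: rest)
        = ((rest.takeWhile (fun y => y == x)).length - 1)
            + triEq (rest.drop (rest.takeWhile (fun y => y == x)).length) := by
      conv_lhs => rw [show (x :: rest)
          = x :: (rest.takeWhile (fun y => y == x))
              ++ rest.drop (rest.takeWhile (fun y => y == x)).length from
        congrArg (fun l => x :: l) (pyRuns_split x rest)]
      exact triEq_run x _ _ (pyRuns_takeWhile_all x rest) (pyRuns_rem_shape x rest)
    rw [pyRuns, hstep]
    by_cases h : ((1 : Int) + (rest.takeWhile (fun y => y == x)).length) > 2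
    · rw [List.filter_cons_of_pos (by simpa using h)]
      simp only [List.map_cons, List.sum_cons, ih]
      have hg2 : 2 ≤ (rest.takeWhile (fun y => y == x)).length := by
        have := h; push_cast at this; omega
      push_cast [Nat.cast_sub (by omega : 1 ≤ (rest.takeWhile (fun y => y == x)).length)]
      ring
    · rw [List.filter_cons_of_neg (by simpa using h)]
      rw [ih]
      have hg1 : (rest.takeWhile (fun y => y == x)).length ≤ 1 := by
        push_cast at h; omega
      have : (rest.takeWhile (fun y => y == x)).length - 1 = 0 := by omega
      rw [this]
      push_cast
      ring

lemma pyRuns_count1 (t : List Int) :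
    (((pyRuns t).filter (fun p => p.1 == 1)).map (fun p => p.2)).sum
      = (t.countP (fun y => y == 1) : Int) := by
  induction t using pyRuns.induct with
  | case1 => simp [pyRuns]
  | case2 x rest ih =>
    have hstep : (x :: rest).countP (fun y => y == 1)
        = (if x = 1 then (rest.takeWhile (fun y => y == x)).length + 1 else 0)
            + (rest.drop (rest.takeWhile (fun y => y == x)).length).countP (fun y => y == 1) := by
      conv_lhs => rw [show (x :: rest)
          = x :: (rest.takeWhile (fun y => y == x))
              ++ rest.drop (rest.takeWhile (fun y => y == x)).length from
        congrArg (fun l => x :: l) (pyRuns_split x rest)]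
      exact count1_run x _ _ (pyRuns_takeWhile_all x rest)
    rw [pyRuns, hstep]
    by_cases h : x = 1
    · rw [List.filter_cons_of_pos (by simpa using h)]
      simp only [List.map_cons, List.sum_cons, ih, if_pos h]
      push_cast
      ring
    · rw [List.filter_cons_of_neg (by simpa using h)]
      rw [ih, if_neg h]
      push_cast
      ring

lemma pyRuns_nil_iff (t : List Int) : pyRuns t = [] ↔ t = [] := by
  cases t with
  | nil => simp [pyRuns]
  | cons x rest => rw [pyRuns]; simp

-- ===== VERDICT (by name: the statement is the Claim_ definition above) =====
theorem count_error_fractions_spec : Claim_equal_count_error_fractions := by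
  intro t _
  show count_error_fractions t = count_error_fractions_alt t
  unfold count_error_fractions count_error_fractions_alt
  rw [foldA_eq]
  simp only []
  set n := t.length with hn
  set k := (pyRuns t).length with hk
  have hsum : ((pyRuns t).map (fun p => p.2)).sum = (n : Int) := pyRuns_sum t
  have hek : eqPairs t + k = n := pyRuns_eqPairs t
  have hse : (List.range n).countP (fun i => decide (i < n - 1) && pPair t i)
      = eqPairs t := by
    rw [countP_range_guard _ _ _ (by omega), range_pPair_eq, zip_eqPairs]
  have hne : (List.range n).countP (fun i => decide (i < n - 1) && !(pPair t i))
      = (n - 1) - eqPairs t := by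
    rw [countP_range_guard _ _ _ (by omega), countP_not_add, range_pPair_eq, zip_eqPairs]
    simp
  have hde : ((List.range n).countP (fun i => decide (i < n - 2) && pTrip t i) : Int)
      = (((pyRuns t).filter (fun p => decide (p.2 > 2))).map (fun p => p.2 - 2)).sum := by
    rw [countP_range_guard _ _ _ (by omega), range_pTrip_eq, zip_triEq, pyRuns_triEq]
  have hz : ((List.range n).countP (fun i => t.getD i 0 == 1) : Int)
      = (((pyRuns t).filter (fun p => p.1 == 1)).map (fun p => p.2)).sum := by
    have : (List.range n).countP (fun i => t.getD i 0 == 1) = t.countP (fun x => x == 1) := by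
      conv_rhs => rw [← map_range_getD t]
      rw [List.countP_map]
      rfl
    rw [this, pyRuns_count1]
  have ho : (List.range n).countP (fun i => !(t.getD i 0 == 1))
      = n - (List.range n).countP (fun i => t.getD i 0 == 1) := by
    rw [countP_not_add]; simp
  have hzle : (List.range n).countP (fun i => t.getD i 0 == 1) ≤ n := by
    have := List.countP_le_length (p := fun i => t.getD i 0 == 1) (l := List.range n)
    simpa using this
  have hk0 : k = 0 ↔ n = 0 := by
    constructor
    · intro h
      have := (pyRuns_nil_iff t).mp (List.length_eq_zero_iff.mp h)
      simp [hn, this]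
    · intro h
      have : t = [] := List.length_eq_zero_iff.mp h
      simp [hk, this, pyRuns]
  simp only [Prod.mk.injEq]
  refine ⟨?_, ?_, ?_, ?_, ?_⟩
  · -- no_err
    rw [hne]
    by_cases hkpos : (k : Int) > 0
    · rw [if_pos hkpos]
      have hk1 : 1 ≤ k := by exact_mod_cast hkpos
      push_cast
      omega
    · rw [if_neg hkpos]
      have : k = 0 := by omega
      have hn0 : n = 0 := hk0.mp this
      simp [hn0]
  · -- single
    rw [hse]
    push_cast
    omega
  · exact hde
  · exact hz
  · rw [ho]
    omega
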